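-- pv_equiv track=rewrite | github.com/yonka2019/M-Tasks | Part2/Modules/ex3.py | is_sorted_polyndrom
-- ===== SOURCE A (Python) =====
-- def is_sorted_polyndrom(_str):
--     """
--     checks if the given string is sorted polyndrom
--     :param _str: string to check
--     :return: (boolean) if string is sorted polyndrom
--     """
--     str_len = len(_str)
--     for start in range(str_len):
--         finish = str_len - start - 1
--
--         if start >= finish:  # finish
--             return True
--
--         elif _str[start] == _str[finish]:  # polyndorm
--             if _str[start] <= _str[start + 1]:  # SORTED polyndorm
--                 continue
--             else:
--                 return False
--         else:
--             return False
-- ===== SOURCE B (Python) =====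
-- def is_sorted_polyndrom(_str):
--     """
--     checks if the given string is sorted polyndrom
--     :param _str: string to check
--     :return: (boolean) if string is sorted polyndrom
--     """
--     palindrome = _str == _str[::-1]
--     half_sorted = all(_str[i] <= _str[i + 1] for i in range(len(_str) // 2))
--     return palindrome and half_sorted
-- ===== Notes on version B (the rewrite author's own statement) =====
-- stated objective: simpler
-- what changed: Replaces A's single fused inward two-pointer loop with early returns by two independent whole-value tests (reverse-and-compare palindrome check plus an all() scan of the first half for sortedness) combined with one conjunction; Pre_ excludes only the empty string, where A's loop body never runs and A falls through returning None, not a boolean.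
-- outside the precondition, e.g. on is_sorted_polyndrom(''): A returns None, B returns True
import Mathlib
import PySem

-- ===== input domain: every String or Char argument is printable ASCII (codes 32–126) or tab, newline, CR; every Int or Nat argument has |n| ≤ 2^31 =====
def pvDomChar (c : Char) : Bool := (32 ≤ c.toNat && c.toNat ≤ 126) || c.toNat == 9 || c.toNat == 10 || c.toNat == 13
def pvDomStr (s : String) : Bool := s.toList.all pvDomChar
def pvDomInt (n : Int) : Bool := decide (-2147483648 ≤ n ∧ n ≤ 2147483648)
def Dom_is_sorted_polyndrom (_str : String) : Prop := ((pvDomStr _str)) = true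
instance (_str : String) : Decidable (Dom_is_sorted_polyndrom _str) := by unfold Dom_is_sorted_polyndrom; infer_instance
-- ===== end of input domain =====

-- B replaces A's fused inward two-pointer loop by a reverse-and-compare palindrome test plus a
-- separate first-half sortedness scan (objective: simpler decomposition, same O(n) cost).

-- ===== PORT A =====
-- the for-loop over range(str_len) with its early returns; [] = loop exhausted (Python returns
-- None there, which happens exactly for the empty string — excluded by Pre_); indices hit by the
-- loop are always in range, so pyGetD with a dummy default is exact for the `<=` comparison.
def pvGoA (s : List Char) (str_len : Int) : List Int → Bool
  | [] => false
  | start :: rest =>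
    let finish := str_len - start - 1
    if finish ≤ start then true
    else if PySem.List.pyGet? s start = PySem.List.pyGet? s finish then
      if PySem.List.pyGetD s start ' ' ≤ PySem.List.pyGetD s (start + 1) ' ' then
        pvGoA s str_len rest
      else false
    else false

def is_sorted_polyndrom (_str : String) : Bool :=
  let s := _str.toList
  let str_len : Int := s.length
  pvGoA s str_len (PySem.List.pyRange 0 str_len 1)

-- ===== PORT B =====
def is_sorted_polyndrom_alt (_str : String) : Bool :=
  let s := _str.toList
  -- _str == _str[::-1]
  let palindrome := PySem.List.slice? s none none (-1) == some s
  -- all(_str[i] <= _str[i+1] for i in range(len(_str) // 2)); indices always in range, default unused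
  let half_sorted := (PySem.List.pyRange 0 (PySem.Int.floordiv (s.length : Int) 2) 1).all
      (fun i => PySem.List.pyGetD s i ' ' ≤ PySem.List.pyGetD s (i + 1) ' ')
  palindrome && half_sorted

-- ===== PRECONDITION & SPEC =====
-- Pre_ excludes only the empty string: A's loop body never runs there and A falls through
-- returning None, which is not a boolean.
def Pre_is_sorted_polyndrom (_str : String) : Prop := _str.toList ≠ []
instance (_str : String) : Decidable (Pre_is_sorted_polyndrom _str) := by
  unfold Pre_is_sorted_polyndrom; infer_instance

def pvWitness_is_sorted_polyndrom : String := "aba"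

def Spec_is_sorted_polyndrom (_str : String) (out : Bool) : Prop := out = is_sorted_polyndrom_alt _str
instance (_str : String) (out : Bool) : Decidable (Spec_is_sorted_polyndrom _str out) := by unfold Spec_is_sorted_polyndrom; infer_instance

-- ===== CLAIM (what is proved, stated in full; the proofs are below) =====
def Claim_equal_is_sorted_polyndrom : Prop := ∀ (_str : String), Dom_is_sorted_polyndrom _str → Pre_is_sorted_polyndrom _str → Spec_is_sorted_polyndrom _str (is_sorted_polyndrom _str)

-- ===== LEMMAS AND PROOFS =====

-- the property A checks at index i (Nat view)
abbrev pvQ (s : List Char) (i : Nat) : Prop :=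
  s[i]? = s[s.length - 1 - i]? ∧ s.getD i ' ' ≤ s.getD (i + 1) ' '

-- characterisation of A's loop from position k
lemma pvGoA_spec (s : List Char) : ∀ (d k : Nat), s.length - k = d → k < s.length →
    pvGoA s (s.length : Int) (PySem.List.pyRange (k : Int) (s.length : Int) 1)
      = decide (∀ i : Nat, i < s.length / 2 → k ≤ i → pvQ s i) := by
  intro d
  induction d with
  | zero => intro k hd hk; omega
  | succ d ih =>
    intro k hd hk
    rw [PySem.List.pyRange_one_cons (by exact_mod_cast hk)]
    show (if (s.length : Int) - k - 1 ≤ k then true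
      else if PySem.List.pyGet? s k = PySem.List.pyGet? s ((s.length : Int) - k - 1) then
        if PySem.List.pyGetD s k ' ' ≤ PySem.List.pyGetD s ((k : Int) + 1) ' ' then
          pvGoA s (s.length : Int) (PySem.List.pyRange ((k : Int) + 1) (s.length : Int) 1)
        else false
      else false) = _
    by_cases hfin : (s.length : Int) - k - 1 ≤ k
    · rw [if_pos hfin]
      symm; rw [decide_eq_true_iff]
      intro i h2i hki; exfalso; omega
    · rw [if_neg hfin]
      have hklt : k < s.length / 2 := by omega
      have hcast1 : (s.length : Int) - k - 1 = ((s.length - 1 - k : Nat) : Int) := by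
        omega
      have hcast2 : ((k : Int) + 1) = (((k + 1 : Nat)) : Int) := by omega
      rw [hcast1, hcast2, PySem.List.pyGet?_natCast, PySem.List.pyGet?_natCast,
        PySem.List.pyGetD_natCast, PySem.List.pyGetD_natCast]
      by_cases heq : s[k]? = s[s.length - 1 - k]?
      · rw [if_pos heq]
        by_cases hle : s.getD k ' ' ≤ s.getD (k + 1) ' '
        · rw [if_pos hle]
          have hk1 : k + 1 < s.length := by omega
          rw [ih (k + 1) (by omega) hk1]
          rw [decide_eq_decide]
          constructor
          · intro h i h2i hki
            rcases Nat.eq_or_lt_of_le hki with rfl | h'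
            · exact ⟨heq, hle⟩
            · exact h i h2i h'
          · intro h i h2i hki; exact h i h2i (by omega)
        · rw [if_neg hle]
          symm; rw [decide_eq_false_iff_not]
          intro h; exact hle (h k hklt le_rfl).2
      · rw [if_neg heq]
        symm; rw [decide_eq_false_iff_not]
        intro h; exact heq (h k hklt le_rfl).1

-- palindrome as the half-range condition
lemma pvPal_iff (s : List Char) :
    (s = s.reverse) ↔ (∀ i : Nat, i < s.length / 2 → s[i]? = s[s.length - 1 - i]?) := by
  constructor
  · intro h i h2i
    conv_lhs => rw [h]
    rw [List.getElem?_reverse (by omega)]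
  · intro h
    apply List.ext_getElem?
    intro i
    by_cases hi : i < s.length
    · rw [List.getElem?_reverse hi]
      rcases Nat.lt_trichotomy (2 * i + 1) s.length with hlt | heq | hgt
      · exact h i (by omega)
      · have : s.length - 1 - i = i := by omega
        rw [this]
      · have hj : s.length - 1 - i < s.length / 2 := by omega
        have := h (s.length - 1 - i) hj
        rw [show s.length - 1 - (s.length - 1 - i) = i from by omega] at this
        exact this.symm
    · rw [List.getElem?_eq_none (by omega), List.getElem?_eq_none (by simp; omega)]

-- B computes the same half-range conjunction
lemma pvAlt_spec (str : String) :
    is_sorted_polyndrom_alt str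
      = decide (∀ i : Nat, i < str.toList.length / 2 → pvQ str.toList i) := by
  unfold is_sorted_polyndrom_alt
  generalize str.toList = s
  simp only [PySem.List.slice?_none_none_neg_one]
  have hfd : PySem.Int.floordiv (s.length : Int) 2 = (s.length : Int) / 2 :=
    PySem.Int.floordiv_eq_ediv_of_pos (by omega)
  rw [hfd, PySem.List.pyRange_one]
  have hcast : (((s.length : Int) / 2 - 0).toNat) = s.length / 2 := by omega
  rw [hcast]
  rcases Bool.eq_false_or_eq_true (decide (∀ i : Nat, i < s.length / 2 → pvQ s i))
    with hdec | hdec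
  · rw [hdec]
    rw [decide_eq_true_iff] at hdec
    apply Bool.and_eq_true_iff.mpr
    constructor
    · simp only [beq_iff_eq, Option.some.injEq]
      exact (((pvPal_iff s).mpr (fun i h2i => (hdec i h2i).1)).symm)
    · rw [List.all_eq_true]
      intro x hx
      simp only [List.mem_map, List.mem_range] at hx
      obtain ⟨j, hj, rfl⟩ := hx
      rw [show ((0 : Int) + (j : Int)) = ((j : Nat) : Int) from by omega]
      rw [show ((j : Int) + 1) = (((j + 1 : Nat)) : Int) from by omega,
        PySem.List.pyGetD_natCast]
      rw [PySem.List.pyGetD_natCast]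
      exact decide_eq_true (hdec j (by omega)).2
  · rw [hdec]
    rw [decide_eq_false_iff_not] at hdec
    push Not at hdec
    obtain ⟨i, h2i, hQ⟩ := hdec
    unfold pvQ at hQ
    by_cases heq : s[i]? = s[s.length - 1 - i]?
    · have hle : ¬ s.getD i ' ' ≤ s.getD (i + 1) ' ' := fun h => hQ ⟨heq, h⟩
      apply Bool.and_eq_false_iff.mpr; right
      rw [List.all_eq_false]
      refine ⟨(i : Int), ?_, ?_⟩
      · simp only [List.mem_map, List.mem_range]
        exact ⟨i, by omega, by omega⟩
      · rw [show ((i : Int) + 1) = (((i + 1 : Nat)) : Int) from by omega,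
          PySem.List.pyGetD_natCast, PySem.List.pyGetD_natCast]
        simpa using hle
    · apply Bool.and_eq_false_iff.mpr; left
      simp only [beq_eq_false_iff_ne, ne_eq, Option.some.injEq]
      intro hrev
      exact heq ((pvPal_iff s).mp hrev.symm i h2i)

-- ===== VERDICT (by name: the statement is the Claim_ definition above) =====
theorem is_sorted_polyndrom_spec : Claim_equal_is_sorted_polyndrom := by
  intro str _hdom hpre
  unfold Spec_is_sorted_polyndrom
  have hne : str.toList ≠ [] := hpre
  have hlen : 0 < str.toList.length := List.length_pos_iff.mpr hne
  unfold is_sorted_polyndrom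
  rw [show ((0 : Int)) = ((0 : Nat) : Int) from rfl]
  rw [pvGoA_spec str.toList (str.toList.length - 0) 0 rfl hlen, pvAlt_spec str]
  rw [decide_eq_decide]
  constructor
  · intro h i h2i; exact h i h2i (by omega)
  · intro h i h2i _; exact h i h2i
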